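-- pv_equiv track=rewrite | github.com/xiongyuchuan3294/api-data-gen | api-data-gen/src/api_data_gen/services/ai_data_generation_service.py | _normalize_field_strategies
-- ===== SOURCE A (Python) =====
-- def _normalize_field_strategies(raw_data: object) -> dict[str, str]:
--     if not isinstance(raw_data, dict):
--         return {}
--
--     normalized: dict[str, str] = {}
--     for key, value in raw_data.items():
--         field_name = str(key)
--         strategy = str(value).strip().lower()
--         if strategy in {"ai", "llm", "model"}:
--             normalized[field_name] = "ai"
--         elif strategy in {"local", "rule", "deterministic"}:
--             normalized[field_name] = "local"
--     return normalized
-- ===== SOURCE B (Python) =====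
-- def _normalize_field_strategies(raw_data: object) -> dict[str, str]:
--     if not isinstance(raw_data, dict):
--         return {}
--     # Stage 1: two classification passes collecting the field names of each group.
--     ai_fields = {str(k) for k, v in raw_data.items()
--                  if str(v).strip().lower() in ("ai", "llm", "model")}
--     local_fields = {str(k) for k, v in raw_data.items()
--                     if str(v).strip().lower() in ("local", "rule", "deterministic")}
--     # Stage 2: one assembly pass over the keys, in the original order.
--     normalized: dict[str, str] = {}
--     for key in raw_data:
--         name = str(key)
--         if name in ai_fields:
--             normalized[name] = "ai"
--         elif name in local_fields:
--             normalized[name] = "local"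
--     return normalized
-- ===== Notes on version B (the rewrite author's own statement) =====
-- stated objective: alternative
-- what changed: Replaces A's single branchy pass with a staged pipeline: two classification passes that collect the set of field names per canonical label, then an assembly pass over the keys that rebuilds the dict from those sets in the original order.
import Mathlib
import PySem

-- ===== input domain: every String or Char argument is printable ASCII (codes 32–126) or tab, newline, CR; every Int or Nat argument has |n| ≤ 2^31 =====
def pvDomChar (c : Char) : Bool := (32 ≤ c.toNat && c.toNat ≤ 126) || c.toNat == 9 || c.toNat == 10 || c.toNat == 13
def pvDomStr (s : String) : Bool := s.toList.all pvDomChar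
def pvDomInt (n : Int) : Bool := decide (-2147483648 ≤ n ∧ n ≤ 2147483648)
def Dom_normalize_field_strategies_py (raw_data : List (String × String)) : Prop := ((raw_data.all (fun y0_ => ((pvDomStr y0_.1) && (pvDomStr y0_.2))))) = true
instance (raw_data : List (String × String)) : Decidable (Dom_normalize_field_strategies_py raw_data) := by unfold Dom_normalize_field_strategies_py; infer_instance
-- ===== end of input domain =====

-- B replaces A's single branchy pass with a staged pipeline: two classification passes
-- collecting the field-name set of each canonical label, then an assembly pass over the keys.

-- ===== PORT A =====
-- The dict argument is represented as its item list; 'raw_data.items()' is the items of the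
-- dict built from those pairs (PySem.Dict.ofList), exact for Python's dict semantics.
def normalize_field_strategies_py (raw_data : List (String × String)) : List (String × String) :=
  ((PySem.Dict.ofList raw_data).items.foldl
    (fun (normalized : PySem.Dict String String) kv =>
      let field_name := kv.1
      let strategy := PySem.Str.lower (PySem.Str.strip kv.2)
      if strategy = "ai" ∨ strategy = "llm" ∨ strategy = "model" then
        normalized.insert field_name "ai"
      else if strategy = "local" ∨ strategy = "rule" ∨ strategy = "deterministic" then
        normalized.insert field_name "local"
      else normalized)
    PySem.Dict.empty).items

-- ===== PORT B =====
def pvIsAi (v : String) : Bool :=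
  let s := PySem.Str.lower (PySem.Str.strip v)
  s == "ai" || s == "llm" || s == "model"

def pvIsLocal (v : String) : Bool :=
  let s := PySem.Str.lower (PySem.Str.strip v)
  s == "local" || s == "rule" || s == "deterministic"

def normalize_field_strategies_py_alt (raw_data : List (String × String)) : List (String × String) :=
  let d := PySem.Dict.ofList raw_data
  let ai_fields : PySem.Set String :=
    PySem.Set.ofList ((d.items.filter (fun kv => pvIsAi kv.2)).map (·.1))
  let local_fields : PySem.Set String :=
    PySem.Set.ofList ((d.items.filter (fun kv => pvIsLocal kv.2)).map (·.1))
  (d.keys.foldl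
    (fun (normalized : PySem.Dict String String) name =>
      if PySem.Set.contains ai_fields name then normalized.insert name "ai"
      else if PySem.Set.contains local_fields name then normalized.insert name "local"
      else normalized)
    PySem.Dict.empty).items

-- ===== PRECONDITION & SPEC =====
def Spec_normalize_field_strategies_py (raw_data : List (String × String)) (out : List (String × String)) : Prop := out = normalize_field_strategies_py_alt raw_data
instance (raw_data : List (String × String)) (out : List (String × String)) : Decidable (Spec_normalize_field_strategies_py raw_data out) := by unfold Spec_normalize_field_strategies_py; infer_instance

-- ===== CLAIM (what is proved, stated in full; the proofs are below) =====
def Claim_equal_normalize_field_strategies_py : Prop := ∀ (raw_data : List (String × String)), Dom_normalize_field_strategies_py raw_data → Spec_normalize_field_strategies_py raw_data (normalize_field_strategies_py raw_data)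

-- ===== LEMMAS AND PROOFS =====
-- With unique keys, a key of an item list belongs to the name set of a filtered group
-- iff its own item passes that group's filter.
lemma pv_mem_group_iff (items : List (String × String)) (p : String × String → Bool)
    (kv : String × String) (hmem : kv ∈ items) (hnd : (items.map (·.1)).Nodup) :
    (kv.1 ∈ PySem.Set.ofList ((items.filter p).map (·.1))) ↔ p kv = true := by
  rw [PySem.Set.mem_ofList]
  constructor
  · intro h
    obtain ⟨kv', hkv', heq⟩ := List.mem_map.mp h
    obtain ⟨hkv'mem, hp⟩ := List.mem_filter.mp hkv'
    have : kv' = kv := List.inj_on_of_nodup_map hnd hkv'mem hmem heq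
    rwa [this] at hp
  · intro hp
    exact List.mem_map.mpr ⟨kv, List.mem_filter.mpr ⟨hmem, hp⟩, rfl⟩

-- The two loop shapes agree on any item list with unique keys.
lemma pv_main (items : List (String × String)) (hnd : (items.map (·.1)).Nodup) :
    items.foldl
      (fun (normalized : PySem.Dict String String) kv =>
        if PySem.Str.lower (PySem.Str.strip kv.2) = "ai" ∨
           PySem.Str.lower (PySem.Str.strip kv.2) = "llm" ∨
           PySem.Str.lower (PySem.Str.strip kv.2) = "model" then
          normalized.insert kv.1 "ai"
        else if PySem.Str.lower (PySem.Str.strip kv.2) = "local" ∨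
                PySem.Str.lower (PySem.Str.strip kv.2) = "rule" ∨
                PySem.Str.lower (PySem.Str.strip kv.2) = "deterministic" then
          normalized.insert kv.1 "local"
        else normalized)
      PySem.Dict.empty
    = (items.map (·.1)).foldl
      (fun (normalized : PySem.Dict String String) name =>
        if PySem.Set.contains
             (PySem.Set.ofList ((items.filter (fun kv => pvIsAi kv.2)).map (·.1))) name then
          normalized.insert name "ai"
        else if PySem.Set.contains
             (PySem.Set.ofList ((items.filter (fun kv => pvIsLocal kv.2)).map (·.1))) name then
          normalized.insert name "local"
        else normalized)
      PySem.Dict.empty := by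
  rw [List.foldl_map]
  apply PySem.List.foldl_congr_mem
  intro n kv hmem
  have hai := (PySem.Set.contains_iff _ kv.1).trans
    (pv_mem_group_iff items (fun kv => pvIsAi kv.2) kv hmem hnd)
  have hloc := (PySem.Set.contains_iff _ kv.1).trans
    (pv_mem_group_iff items (fun kv => pvIsLocal kv.2) kv hmem hnd)
  have hdA : pvIsAi kv.2 = true ↔
      (PySem.Str.lower (PySem.Str.strip kv.2) = "ai" ∨
       PySem.Str.lower (PySem.Str.strip kv.2) = "llm" ∨
       PySem.Str.lower (PySem.Str.strip kv.2) = "model") := by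
    simp [pvIsAi, or_assoc]
  have hdL : pvIsLocal kv.2 = true ↔
      (PySem.Str.lower (PySem.Str.strip kv.2) = "local" ∨
       PySem.Str.lower (PySem.Str.strip kv.2) = "rule" ∨
       PySem.Str.lower (PySem.Str.strip kv.2) = "deterministic") := by
    simp [pvIsLocal, or_assoc]
  by_cases h1 : PySem.Str.lower (PySem.Str.strip kv.2) = "ai" ∨
      PySem.Str.lower (PySem.Str.strip kv.2) = "llm" ∨
      PySem.Str.lower (PySem.Str.strip kv.2) = "model"
  · rw [if_pos h1, if_pos (hai.mpr (hdA.mpr h1))]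
  · rw [if_neg h1, if_neg (fun hc => h1 (hdA.mp (hai.mp hc)))]
    by_cases h2 : PySem.Str.lower (PySem.Str.strip kv.2) = "local" ∨
        PySem.Str.lower (PySem.Str.strip kv.2) = "rule" ∨
        PySem.Str.lower (PySem.Str.strip kv.2) = "deterministic"
    · rw [if_pos h2, if_pos (hloc.mpr (hdL.mpr h2))]
    · rw [if_neg h2, if_neg (fun hc => h2 (hdL.mp (hloc.mp hc)))]

-- ===== VERDICT (by name: the statement is the Claim_ definition above) =====
theorem normalize_field_strategies_py_spec : Claim_equal_normalize_field_strategies_py := by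
  intro raw_data _
  unfold Spec_normalize_field_strategies_py normalize_field_strategies_py normalize_field_strategies_py_alt
  exact congrArg PySem.Dict.items
    (pv_main (PySem.Dict.ofList raw_data).items (PySem.Dict.nodup_keys_ofList raw_data))
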